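-- pv_equiv track=rewrite | github.com/zhaocq-nlp/NJUNMT-tf | seq2seq/data/vocab.py | bpe_concat
-- ===== SOURCE A (Python) =====
-- def bpe_concat(tokens):
--     new_pred_tokens = []
--     concat_word = False
--     for word in tokens:
--         next_concat_word = False
--         if word.endswith("@@"):
--             word = word[:-2]
--             next_concat_word = True
--         if concat_word:
--             new_pred_tokens[-1] = new_pred_tokens[-1] + word
--         else:
--             new_pred_tokens.append(word)
--         concat_word = next_concat_word
--     return new_pred_tokens
-- ===== SOURCE B (Python) =====
-- def bpe_concat(tokens):
--     result = []
--     buffer = []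
--     for word in tokens:
--         if word.endswith("@@"):
--             buffer.append(word[:-2])
--         else:
--             buffer.append(word)
--             result.append("".join(buffer))
--             buffer = []
--     if buffer:
--         result.append("".join(buffer))
--     return result
-- ===== Notes on version B (the rewrite author's own statement) =====
-- stated objective: simpler
-- what changed: B collects the current word's stripped pieces in a buffer and flushes a joined word on each non-'@@' token (plus a final flush), instead of A's carried concat flag with in-place mutation of the result's last element.
import Mathlib
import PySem

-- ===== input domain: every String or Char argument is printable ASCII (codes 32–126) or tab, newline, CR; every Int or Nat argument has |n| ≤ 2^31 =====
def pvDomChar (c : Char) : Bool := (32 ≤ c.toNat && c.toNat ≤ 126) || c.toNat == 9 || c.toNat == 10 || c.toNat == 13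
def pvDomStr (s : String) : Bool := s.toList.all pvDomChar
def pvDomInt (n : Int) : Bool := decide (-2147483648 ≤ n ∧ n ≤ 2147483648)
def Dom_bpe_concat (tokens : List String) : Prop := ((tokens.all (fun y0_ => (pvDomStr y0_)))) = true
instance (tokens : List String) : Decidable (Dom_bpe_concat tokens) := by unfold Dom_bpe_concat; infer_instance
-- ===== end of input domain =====

-- B rewrites A's carry-a-flag-and-mutate-the-last-element loop as a buffer-of-pieces loop
-- flushed on word boundaries (objective: simpler decomposition; same cost).

-- ===== PORT A =====
-- the loop body of A: state = (new_pred_tokens, concat_word)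
def bpeStepA (st : List String × Bool) (word : String) : List String × Bool :=
  -- (word, next_concat_word) after the '@@' test
  let p := if PySem.Str.endswith word "@@"
           then (PySem.Str.slice word none (some (-2)), true)
           else (word, false)
  -- 'new_pred_tokens[-1] = new_pred_tokens[-1] + word' (the list is provably nonempty when st.2)
  let acc := if st.2
             then st.1.dropLast ++ [String.ofList ((st.1.getLastD "").toList ++ p.1.toList)]
             else st.1 ++ [p.1]
  (acc, p.2)

def bpe_concat (tokens : List String) : List String :=
  (tokens.foldl bpeStepA ([], false)).1

-- ===== PORT B =====
-- the loop body of B: state = (result, buffer)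
def bpeStepB (st : List String × List String) (word : String) : List String × List String :=
  if PySem.Str.endswith word "@@"
  then (st.1, st.2 ++ [PySem.Str.slice word none (some (-2))])
  else (st.1 ++ [PySem.Str.join "" (st.2 ++ [word])], ([] : List String))

def bpe_concat_alt (tokens : List String) : List String :=
  let st := tokens.foldl bpeStepB ([], [])
  if st.2.isEmpty then st.1 else st.1 ++ [PySem.Str.join "" st.2]

-- ===== PRECONDITION & SPEC =====
def Spec_bpe_concat (tokens : List String) (out : List String) : Prop := out = bpe_concat_alt tokens
instance (tokens : List String) (out : List String) : Decidable (Spec_bpe_concat tokens out) := by unfold Spec_bpe_concat; infer_instance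

-- ===== CLAIM (what is proved, stated in full; the proofs are below) =====
def Claim_equal_bpe_concat : Prop := ∀ (tokens : List String), Dom_bpe_concat tokens → Spec_bpe_concat tokens (bpe_concat tokens)

-- ===== LEMMAS AND PROOFS =====

-- ''.join with empty separator is concatenation
theorem join_nil_eq_flatten (css : List (List Char)) : PySem.Chars.join [] css = css.flatten := by
  induction css with
  | nil => simp [PySem.Chars.join, List.intercalate]
  | cons c cs ih =>
    cases cs with
    | nil => simp [PySem.Chars.join, List.intercalate]
    | cons d ds =>
      rw [PySem.Chars.join_cons_cons] at *
      simp [ih]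

-- loop invariant: A's state is B's result with the pending buffer joined onto the end,
-- and A's flag is "buffer nonempty"
theorem bpe_loop (toks res buf : List String) :
    (toks.foldl bpeStepA
        ((if buf.isEmpty then res else res ++ [PySem.Str.join "" buf]), !buf.isEmpty)).1
      = (fun b : List String × List String =>
          if b.2.isEmpty then b.1 else b.1 ++ [PySem.Str.join "" b.2])
          (toks.foldl bpeStepB (res, buf)) := by
  induction toks generalizing res buf with
  | nil => simp
  | cons w ts ih =>
    by_cases hw : PySem.Str.endswith w "@@"
    all_goals simp at hw
    · by_cases hb : buf.isEmpty
      · have hbuf : buf = [] := List.isEmpty_iff.mp hb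
        subst hbuf
        have := ih res [PySem.Str.slice w none (some (-2))]
        simp [bpeStepA, bpeStepB, hw, PySem.Str.join, join_nil_eq_flatten] at this ⊢
        exact this
      · obtain ⟨b0, bs, rfl⟩ : ∃ b0 bs, buf = b0 :: bs := by
          cases buf with
          | nil => simp at hb
          | cons b0 bs => exact ⟨b0, bs, rfl⟩
        have := ih res ((b0 :: bs) ++ [PySem.Str.slice w none (some (-2))])
        simp [bpeStepA, bpeStepB, hw, PySem.Str.join, join_nil_eq_flatten] at this ⊢
        exact this
    · by_cases hb : buf.isEmpty
      · have hbuf : buf = [] := List.isEmpty_iff.mp hb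
        subst hbuf
        have := ih (res ++ [PySem.Str.join "" [w]]) []
        simp [bpeStepA, bpeStepB, hw, PySem.Str.join, join_nil_eq_flatten] at this ⊢
        exact this
      · obtain ⟨b0, bs, rfl⟩ : ∃ b0 bs, buf = b0 :: bs := by
          cases buf with
          | nil => simp at hb
          | cons b0 bs => exact ⟨b0, bs, rfl⟩
        have := ih (res ++ [PySem.Str.join "" ((b0 :: bs) ++ [w])]) []
        simp [bpeStepA, bpeStepB, hw, PySem.Str.join, join_nil_eq_flatten] at this ⊢
        exact this

-- ===== VERDICT (by name: the statement is the Claim_ definition above) =====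
theorem bpe_concat_spec : Claim_equal_bpe_concat := by
  intro tokens _
  unfold Spec_bpe_concat bpe_concat bpe_concat_alt
  have := bpe_loop tokens [] []
  simpa using this
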